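-- pv_equiv track=rewrite | github.com/aman0v0/typing-speed-test | Typing_Speed.py | tperror
-- ===== SOURCE A (Python) =====
-- def tperror(prompt, inwords):
--     words = prompt.split()
--     errors = 0
--
--     for i in range(len(inwords)):
--         if i in (0, len(inwords) - 1):
--             if inwords[i] == words[i]:
--                 continue
--             else:
--                 errors += 1
--         else:
--             if inwords[i] == words[i]:
--                 if (inwords[i + 1] == words[i + 1]) and (inwords[i - 1] == words[i - 1]):
--                     continue
--                 else:
--                     errors += 1
--             else:
--                 errors += 1
--     return errors
-- ===== SOURCE B (Python) =====
-- def tperror(prompt, inwords):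
--     words = prompt.split()
--     n = len(inwords)
--     # mismatch positions
--     bad = {i for i in range(n) if inwords[i] != words[i]}
--     # dilate: a mismatch also invalidates its interior neighbours
--     err = set(bad)
--     for i in bad:
--         for j in (i - 1, i + 1):
--             if 0 < j < n - 1:
--                 err.add(j)
--     return len(err)
-- ===== Notes on version B (the rewrite author's own statement) =====
-- stated objective: alternative
-- what changed: B replaces A's per-index windowed scan by a set-dilation algorithm: it collects the set of mismatch positions, dilates each mismatch one step into interior positions via set insertion, and returns the cardinality of the resulting error set.
import Mathlib
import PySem

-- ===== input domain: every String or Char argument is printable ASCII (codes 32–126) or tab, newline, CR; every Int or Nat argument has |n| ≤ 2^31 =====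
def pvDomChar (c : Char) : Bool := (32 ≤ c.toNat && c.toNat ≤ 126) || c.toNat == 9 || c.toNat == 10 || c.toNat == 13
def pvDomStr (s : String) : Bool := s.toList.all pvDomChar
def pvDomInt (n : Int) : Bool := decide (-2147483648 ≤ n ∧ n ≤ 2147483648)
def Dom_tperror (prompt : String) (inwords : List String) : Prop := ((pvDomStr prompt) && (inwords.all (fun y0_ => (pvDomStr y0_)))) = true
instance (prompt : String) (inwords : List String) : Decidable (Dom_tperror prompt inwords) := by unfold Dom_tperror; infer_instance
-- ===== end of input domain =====

-- B replaces A's per-index windowed scan by a set-dilation algorithm: collect the set of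
-- mismatch positions, dilate it by one step into interior positions, and return the set's
-- cardinality; objective: alternative.

-- ===== PORT A =====
def tperror (prompt : String) (inwords : List String) : Int :=
  let words := PySem.Str.split₀ prompt
  (PySem.List.pyRange 0 (inwords.length : Int) 1).foldl (fun errors i =>
    if i == 0 || i == (inwords.length : Int) - 1 then
      if PySem.List.pyGet? inwords i == PySem.List.pyGet? words i then errors
      else errors + 1
    else
      if PySem.List.pyGet? inwords i == PySem.List.pyGet? words i then
        if (PySem.List.pyGet? inwords (i + 1) == PySem.List.pyGet? words (i + 1)) &&
           (PySem.List.pyGet? inwords (i - 1) == PySem.List.pyGet? words (i - 1)) then errors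
        else errors + 1
      else errors + 1) 0

-- ===== PORT B =====
def tperror_alt (prompt : String) (inwords : List String) : Int :=
  let words := PySem.Str.split₀ prompt
  let n : Int := inwords.length
  -- bad = {i for i in range(n) if inwords[i] != words[i]}
  let bad : PySem.Set Int := PySem.Set.ofList ((PySem.List.pyRange 0 n 1).filter
    (fun i => !(PySem.List.pyGet? inwords i == PySem.List.pyGet? words i)))
  -- err = set(bad); for i in bad: for j in (i-1, i+1): if 0 < j < n-1: err.add(j)
  let err : PySem.Set Int := bad.foldl (fun s i =>
    [i - 1, i + 1].foldl (fun s j =>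
      if 0 < j && j < n - 1 then PySem.Set.add s j else s) s) bad
  (err.length : Int)

-- ===== PRECONDITION & SPEC =====
-- A (and B) raise IndexError exactly when inwords has more entries than prompt.split(); Pre_ excludes those.
def Pre_tperror (prompt : String) (inwords : List String) : Prop :=
  inwords.length ≤ (PySem.Str.split₀ prompt).length
instance (prompt : String) (inwords : List String) : Decidable (Pre_tperror prompt inwords) := by
  unfold Pre_tperror; infer_instance
def pvWitness_tperror : String × List String := ("the quick fox", ["the", "quikc"])
def Spec_tperror (prompt : String) (inwords : List String) (out : Int) : Prop := out = tperror_alt prompt inwords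
instance (prompt : String) (inwords : List String) (out : Int) : Decidable (Spec_tperror prompt inwords out) := by unfold Spec_tperror; infer_instance

-- ===== CLAIM (what is proved, stated in full; the proofs are below) =====
def Claim_equal_tperror : Prop := ∀ (prompt : String) (inwords : List String), Dom_tperror prompt inwords → Pre_tperror prompt inwords → Spec_tperror prompt inwords (tperror prompt inwords)

-- ===== LEMMAS AND PROOFS =====

-- one dilation step: what the inner two-element loop adds
theorem step_mem (n i : Int) (s : PySem.Set Int) (j : Int) :
    j ∈ [i - 1, i + 1].foldl (fun s j' =>
        if 0 < j' && j' < n - 1 then PySem.Set.add s j' else s) s ↔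
      j ∈ s ∨ ((j = i - 1 ∨ j = i + 1) ∧ 0 < j ∧ j < n - 1) := by
  simp only [List.foldl_cons, List.foldl_nil]
  split_ifs with h1 h2 h2 <;>
    simp only [Bool.and_eq_true, decide_eq_true_eq] at h1 h2 <;>
    by_cases hs : j ∈ s <;>
      simp only [PySem.Set.mem_add, hs, true_or, false_or]
  all_goals (rw [iff_iff_implies_and_implies]; constructor <;> intro h <;>
    first | exact h.elim | omega)

-- one dilation step preserves Nodup
theorem step_nodup (n i : Int) (s : PySem.Set Int) (hs : s.Nodup) :
    ([i - 1, i + 1].foldl (fun s j' =>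
        if 0 < j' && j' < n - 1 then PySem.Set.add s j' else s) s).Nodup := by
  simp only [List.foldl_cons, List.foldl_nil]
  split_ifs <;> first
    | exact PySem.Set.nodup_add _ _ (PySem.Set.nodup_add _ _ hs)
    | exact PySem.Set.nodup_add _ _ hs
    | exact hs

-- membership in the whole dilation loop
theorem mem_dilate (L : List Int) (n : Int) (s : PySem.Set Int) (j : Int) :
    j ∈ L.foldl (fun s i =>
        [i - 1, i + 1].foldl (fun s j' =>
          if 0 < j' && j' < n - 1 then PySem.Set.add s j' else s) s) s ↔
      j ∈ s ∨ ∃ i ∈ L, (j = i - 1 ∨ j = i + 1) ∧ 0 < j ∧ j < n - 1 := by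
  induction L generalizing s with
  | nil => simp
  | cons i L ih =>
    rw [List.foldl_cons, ih, step_mem]
    simp only [List.mem_cons]
    constructor
    · rintro ((h | h) | ⟨i', hi', hj⟩)
      · exact Or.inl h
      · exact Or.inr ⟨i, Or.inl rfl, h⟩
      · exact Or.inr ⟨i', Or.inr hi', hj⟩
    · rintro (h | ⟨i', hi' | hi', hj⟩)
      · exact Or.inl (Or.inl h)
      · subst hi'; exact Or.inl (Or.inr hj)
      · exact Or.inr ⟨i', hi', hj⟩

-- the dilation loop preserves Nodup
theorem nodup_dilate (L : List Int) (n : Int) (s : PySem.Set Int) (hs : s.Nodup) :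
    (L.foldl (fun s i =>
        [i - 1, i + 1].foldl (fun s j' =>
          if 0 < j' && j' < n - 1 then PySem.Set.add s j' else s) s) s).Nodup := by
  induction L generalizing s with
  | nil => exact hs
  | cons i L ih =>
    rw [List.foldl_cons]
    exact ih _ (step_nodup n i s hs)

-- the core equality, no hypotheses needed: both sides count the same index set
theorem tperror_eq_alt (prompt : String) (inwords : List String) :
    tperror prompt inwords = tperror_alt prompt inwords := by
  unfold tperror tperror_alt
  set words := PySem.Str.split₀ prompt with hw
  set n : Int := (inwords.length : Int) with hn
  set m : Int → Bool := fun j => PySem.List.pyGet? inwords j == PySem.List.pyGet? words j with hm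
  -- the error predicate A counts
  set c : Int → Bool := fun i =>
    if i == 0 || i == n - 1 then !(m i) else !(m i && (m (i + 1) && m (i - 1))) with hc
  have hA : (PySem.List.pyRange 0 n 1).foldl (fun errors i =>
      if i == 0 || i == n - 1 then
        if m i then errors else errors + 1
      else
        if m i then
          if m (i + 1) && m (i - 1) then errors else errors + 1
        else errors + 1) 0
      = ((PySem.List.pyRange 0 n 1).countP c : Int) := by
    have hcongr := PySem.List.foldl_congr_mem (PySem.List.pyRange 0 n 1)
      (fun (errors : Int) i =>
        if i == 0 || i == n - 1 then
          if m i then errors else errors + 1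
        else
          if m i then
            if m (i + 1) && m (i - 1) then errors else errors + 1
          else errors + 1)
      (fun (errors : Int) i => if c i then errors + 1 else errors) (0 : Int) ?_
    · rw [hcongr, PySem.List.foldl_count_if c (PySem.List.pyRange 0 n 1) 0, Int.zero_add]
    intro acc i _
    simp only [hc]
    by_cases h0 : (i == 0 || i == n - 1) = true
    · rw [if_pos h0, if_pos h0]
      cases hmi : m i <;> simp [hmi]
    · rw [if_neg h0, if_neg h0]
      cases hmi : m i <;>
        first
          | (simp [hmi]; done)
          | (cases hp : m (i + 1) <;> cases hq : m (i - 1) <;> simp [hmi, hp, hq])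
  rw [hA]
  set bad : PySem.Set Int := PySem.Set.ofList ((PySem.List.pyRange 0 n 1).filter (fun i => !(m i))) with hbad
  set err : PySem.Set Int := bad.foldl (fun s i =>
    [i - 1, i + 1].foldl (fun s j =>
      if 0 < j && j < n - 1 then PySem.Set.add s j else s) s) bad with herr
  -- membership in bad
  have hmem_bad : ∀ j : Int, j ∈ bad ↔ (0 ≤ j ∧ j < n) ∧ ¬ m j = true := by
    intro j
    rw [hbad, PySem.Set.mem_ofList, List.mem_filter, PySem.List.mem_pyRange_one]
    simp
  -- membership in err
  have hmem_err : ∀ j : Int, j ∈ err ↔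
      j ∈ bad ∨ ∃ i ∈ bad, (j = i - 1 ∨ j = i + 1) ∧ 0 < j ∧ j < n - 1 := by
    intro j; rw [herr]; exact mem_dilate bad n bad j
  -- members of err lie in the range and satisfy c
  have hkey : ∀ j : Int, 0 ≤ j → j < n → (c j = true ↔ j ∈ err) := by
    intro j hj0 hjn
    rw [hmem_err]
    by_cases hend : j = 0 ∨ j = n - 1
    · have hcj : c j = !(m j) := by
        rcases hend with h | h <;> simp [hc, h]
      rw [hcj]
      constructor
      · intro h
        left
        rw [hmem_bad]
        simp only [Bool.not_eq_true'] at h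
        exact ⟨⟨hj0, hjn⟩, by simp [h]⟩
      · rintro (h | ⟨i, _, _, hj1, hj2⟩)
        · rw [hmem_bad] at h
          simp [h.2]
        · omega
    · rw [not_or] at hend
      have hcj : c j = !(m j && (m (j + 1) && m (j - 1))) := by
        simp only [hc]
        rw [if_neg (by simp [hend.1, hend.2])]
      rw [hcj]
      constructor
      · intro h
        simp only [Bool.not_and, Bool.not_eq_true', Bool.or_eq_true,
          Bool.not_eq_true] at h
        rcases h with h | h | h
        · left; rw [hmem_bad]; exact ⟨⟨hj0, hjn⟩, by simp [h]⟩
        · right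
          refine ⟨j + 1, ?_, Or.inl (by ring), by omega, by omega⟩
          rw [hmem_bad]; exact ⟨⟨by omega, by omega⟩, by simp [h]⟩
        · right
          refine ⟨j - 1, ?_, Or.inr (by ring), by omega, by omega⟩
          rw [hmem_bad]; exact ⟨⟨by omega, by omega⟩, by simp [h]⟩
      · rintro (h | ⟨i, hi, hj | hj, _, _⟩)
        · rw [hmem_bad] at h
          simp [h.2]
        · have : i = j + 1 := by omega
          subst this
          rw [hmem_bad] at hi
          simp [hi.2]
        · have : i = j - 1 := by omega
          subst this
          rw [hmem_bad] at hi
          simp [hi.2]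
  -- err is a Nodup sublist (as a set) of the range, so counting c over the range counts err
  have herr_nodup : err.Nodup := by
    rw [herr]
    exact nodup_dilate bad n bad (PySem.Set.nodup_ofList _)
  have herr_sub : ∀ j ∈ err, 0 ≤ j ∧ j < n := by
    intro j hj
    rw [hmem_err] at hj
    rcases hj with h | ⟨i, _, _, h1, h2⟩
    · exact ((hmem_bad j).mp h).1
    · omega
  have hfilter : (PySem.List.pyRange 0 n 1).countP c
      = ((PySem.List.pyRange 0 n 1).filter (fun j => decide (j ∈ err))).length := by
    rw [List.countP_eq_length_filter]
    congr 1
    apply List.filter_congr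
    intro j hj
    rw [PySem.List.mem_pyRange_one] at hj
    have hk := hkey j hj.1 hj.2
    by_cases h : j ∈ err
    · simp [h, hk.mpr h]
    · have hcj : c j = false := by
        cases hcv : c j
        · rfl
        · exact absurd (hk.mp hcv) h
      simp [hcj, h]
  have hperm : ((PySem.List.pyRange 0 n 1).filter (fun j => decide (j ∈ err))).Perm err := by
    rw [List.perm_ext_iff_of_nodup (List.Nodup.filter _ (PySem.List.nodup_pyRange_one 0 n)) herr_nodup]
    intro j
    rw [List.mem_filter, PySem.List.mem_pyRange_one]
    constructor
    · intro h; exact of_decide_eq_true h.2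
    · intro h
      exact ⟨⟨(herr_sub j h).1, (herr_sub j h).2⟩, decide_eq_true h⟩
  rw [hfilter, hperm.length_eq]

-- ===== VERDICT (by name: the statement is the Claim_ definition above) =====
theorem tperror_spec : Claim_equal_tperror := by
  intro prompt inwords _ _
  unfold Spec_tperror
  exact tperror_eq_alt prompt inwords
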